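-- pv_equiv track=rewrite | github.com/mbober01/j-skryptowe-projekt | main.py | algorytm
-- ===== SOURCE A (Python) =====
-- def algorytm(ciag):
--     length = len(ciag)
--     for x in range(length):
--         temp = 0
--         for index in range(x+1,(length+x)//2+1):
--             temp += 1
--             part1 = ciag[x:index]
--             part2 = ciag[index:index+temp]
--             if part1 == part2:
--                 return f"nie jest niepowtarzalny {part1}"
--
--     return "jest niepowtarzalny"
-- ===== SOURCE B (Python) =====
-- def algorytm(ciag):
--     n = len(ciag)
--     mis = {}  # diagonal L -> first known mismatch position m (chars m and m+L differ or run off the end)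
--     for x in range(n):
--         for L in range(1, (n - x) // 2 + 1):
--             m = mis.get(L, -1)
--             if m < x:
--                 m = x
--                 while m + L < n and ciag[m] == ciag[m + L]:
--                     m += 1
--                 mis[L] = m
--             if m - x >= L:
--                 return "nie jest niepowtarzalny " + ciag[x:x + L]
--     return "jest niepowtarzalny"
-- ===== Notes on version B (the rewrite author's own statement) =====
-- stated objective: faster
-- what changed: Instead of re-comparing two fresh slices for every (start, length) pair, B keeps a per-diagonal memo of the first mismatch position (a lazy longest-common-extension oracle), so each candidate square is decided by one subtraction and character comparisons are never repeated across starting positions.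
import Mathlib
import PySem

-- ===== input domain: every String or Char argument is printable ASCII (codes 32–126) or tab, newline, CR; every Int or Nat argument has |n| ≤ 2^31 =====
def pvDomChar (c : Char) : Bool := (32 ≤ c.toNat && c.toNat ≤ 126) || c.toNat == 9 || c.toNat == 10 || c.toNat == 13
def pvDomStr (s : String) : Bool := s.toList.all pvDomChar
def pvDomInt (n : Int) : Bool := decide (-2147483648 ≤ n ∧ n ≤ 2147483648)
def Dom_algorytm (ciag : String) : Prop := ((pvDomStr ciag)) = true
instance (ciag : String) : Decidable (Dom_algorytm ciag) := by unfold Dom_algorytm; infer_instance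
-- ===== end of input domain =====

-- B replaces A's quadratic-per-position slice comparisons by a memoized per-diagonal
-- first-mismatch oracle (objective: faster; return value proved equal on all inputs).

-- ===== PORT A =====
-- inner 'for index in range(...)' loop with early return; temp is threaded exactly as in A
def aInner (cs : List Char) (x : Int) (temp : Int) : List Int → Option (List Char)
  | [] => none
  | index :: rest =>
    let t := temp + 1
    let part1 := PySem.List.slice cs (some x) (some index)
    let part2 := PySem.List.slice cs (some index) (some (index + t))
    if part1 = part2 then some part1 else aInner cs x t rest

-- outer 'for x in range(length)' loop
def aOuter (cs : List Char) (n : Int) : List Int → Option (List Char)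
  | [] => none
  | x :: rest =>
    match aInner cs x 0 (PySem.List.pyRange (x + 1) (PySem.Int.floordiv (n + x) 2 + 1) 1) with
    | some p => some p
    | none => aOuter cs n rest

def algorytm (ciag : String) : String :=
  let cs := ciag.toList
  let n : Int := PySem.Str.len ciag
  match aOuter cs n (PySem.List.pyRange 0 n 1) with
  | some p => String.ofList ("nie jest niepowtarzalny ".toList ++ p)
  | none => "jest niepowtarzalny"

-- ===== PORT B =====
-- the 'while m + L < n and ciag[m] == ciag[m+L]: m += 1' loop of Source B
def scanMis (cs : List Char) (L : Int) (m : Int) : Int :=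
  if h : m + L < (cs.length : Int) ∧
      PySem.List.pyGetD cs m ' ' = PySem.List.pyGetD cs (m + L) ' ' then
    scanMis cs L (m + 1)
  else m
termination_by ((cs.length : Int) - L - m).toNat
decreasing_by omega

-- inner 'for L in range(1, ...)' loop of Source B, threading the memo dict
def bInner (cs : List Char) (x : Int) (d : PySem.Dict Int Int) : List Int → Option (List Char) × PySem.Dict Int Int
  | [] => (none, d)
  | L :: rest =>
    let m0 := d.getD L (-1)
    let md := if m0 < x then (scanMis cs L x, d.insert L (scanMis cs L x)) else (m0, d)
    if L ≤ md.1 - x then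
      (some (PySem.List.slice cs (some x) (some (x + L))), md.2)
    else bInner cs x md.2 rest

-- outer 'for x in range(n)' loop of Source B
def bOuter (cs : List Char) (n : Int) (d : PySem.Dict Int Int) : List Int → Option (List Char)
  | [] => none
  | x :: rest =>
    match bInner cs x d (PySem.List.pyRange 1 (PySem.Int.floordiv (n - x) 2 + 1) 1) with
    | (some p, _) => some p
    | (none, d') => bOuter cs n d' rest

def algorytm_alt (ciag : String) : String :=
  let cs := ciag.toList
  let n : Int := PySem.Str.len ciag
  match bOuter cs n PySem.Dict.empty (PySem.List.pyRange 0 n 1) with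
  | some p => String.ofList ("nie jest niepowtarzalny ".toList ++ p)
  | none => "jest niepowtarzalny"

-- ===== PRECONDITION & SPEC =====
def Spec_algorytm (ciag : String) (out : String) : Prop := out = algorytm_alt ciag
instance (ciag : String) (out : String) : Decidable (Spec_algorytm ciag out) := by unfold Spec_algorytm; infer_instance

-- ===== CLAIM (what is proved, stated in full; the proofs are below) =====
def Claim_equal_algorytm : Prop := ∀ (ciag : String), Dom_algorytm ciag → Spec_algorytm ciag (algorytm ciag)

-- ===== LEMMAS AND PROOFS =====

-- 'characters m and m+L of cs match'
def MatchAt (cs : List Char) (L m : Int) : Prop :=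
  m + L < (cs.length : Int) ∧ PySem.List.pyGetD cs m ' ' = PySem.List.pyGetD cs (m + L) ' '

theorem scanMis_ge (cs : List Char) (L m : Int) : m ≤ scanMis cs L m := by
  fun_induction scanMis with
  | case1 m h ih => omega
  | case2 m h => omega

theorem scanMis_spec (cs : List Char) (L m : Int) :
    (∀ i, m ≤ i → i < scanMis cs L m → MatchAt cs L i) ∧ ¬ MatchAt cs L (scanMis cs L m) := by
  fun_induction scanMis with
  | case1 m h ih =>
    refine ⟨fun i h1 h2 => ?_, ih.2⟩
    rcases eq_or_lt_of_le h1 with rfl | hlt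
    · exact h
    · exact ih.1 i (by omega) h2
  | case2 m h => exact ⟨fun i h1 h2 => absurd h2 (by omega), h⟩

theorem scanMis_absorb (cs : List Char) (L x0 x : Int) (h0 : x0 ≤ x)
    (hx : x ≤ scanMis cs L x0) : scanMis cs L x = scanMis cs L x0 := by
  have hge := scanMis_ge cs L
  fun_induction scanMis cs L x0 with
  | case1 m h ih =>
    rcases eq_or_lt_of_le h0 with rfl | hlt
    · rw [scanMis]; simp [h]
    · exact ih (by omega) hx
  | case2 m h =>
    have : x = m := le_antisymm hx h0
    subst this; rw [scanMis]; simp [h]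

def InvD (cs : List Char) (x : Int) (d : PySem.Dict Int Int) : Prop :=
  ∀ L m, d.get? L = some m → ∃ x0 : Int, 0 ≤ x0 ∧ x0 ≤ x ∧ m = scanMis cs L x0

theorem InvD_mono (cs : List Char) (x x' : Int) (h : x ≤ x') (d : PySem.Dict Int Int)
    (hd : InvD cs x d) : InvD cs x' d := by
  intro L m hm
  obtain ⟨x0, h0, h1, h2⟩ := hd L m hm
  exact ⟨x0, h0, by omega, h2⟩

theorem take_drop_eq_iff (cs : List Char) (a b k : Nat) :
    ((cs.drop a).take k = (cs.drop b).take k) ↔ ∀ j < k, cs[a+j]? = cs[b+j]? := by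
  rw [List.ext_getElem?_iff]
  constructor
  · intro h j hj
    simpa [List.getElem?_take, List.getElem?_drop, hj] using h j
  · intro h i
    by_cases hi : i < k
    · simpa [List.getElem?_take, List.getElem?_drop, hi] using h i hi
    · simp [hi]

theorem cond_iff (cs : List Char) (x L : Int) (hx : 0 ≤ x) (hL : 1 ≤ L)
    (hb : x + 2 * L ≤ (cs.length : Int)) :
    (PySem.List.slice cs (some x) (some (x + L)) = PySem.List.slice cs (some (x + L)) (some (x + 2 * L)))
      ↔ L ≤ scanMis cs L x - x := by
  have hxL : (0:Int) ≤ x + L := by omega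
  have h2L : (0:Int) ≤ x + 2*L := by omega
  rw [PySem.List.slice_toNat _ hx hxL, PySem.List.slice_toNat _ hxL h2L]
  have e1 : (x + L).toNat - x.toNat = L.toNat := by omega
  have e2 : (x + 2*L).toNat - (x + L).toNat = L.toNat := by omega
  rw [e1, e2, take_drop_eq_iff]
  have hlen : x.toNat + 2 * L.toNat ≤ cs.length := by omega
  have hmatch : ∀ j : Nat, j < L.toNat → (MatchAt cs L (x + j) ↔ cs[x.toNat + j]? = cs[(x+L).toNat + j]?) := by
    intro j hj
    have hb1 : x + j + L < (cs.length : Int) := by omega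
    have hr1 : (x + (j:Int)).toNat < cs.length := by omega
    have hr2 : (x + (j:Int) + L).toNat < cs.length := by omega
    rw [MatchAt]
    rw [PySem.List.pyGetD_eq_getElem cs ' ' (by omega : (0:Int) ≤ x + j) (by omega),
        PySem.List.pyGetD_eq_getElem cs ' ' (by omega : (0:Int) ≤ x + j + L) (by omega)]
    constructor
    · rintro ⟨-, h2⟩
      rw [List.getElem?_eq_getElem (by omega), List.getElem?_eq_getElem (by omega)]
      have : x.toNat + j = (x + (j:Int)).toNat := by omega
      have e4 : (x+L).toNat + j = (x + (j:Int) + L).toNat := by omega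
      simp_all
    · intro h2
      refine ⟨hb1, ?_⟩
      rw [List.getElem?_eq_getElem (by omega), List.getElem?_eq_getElem (by omega)] at h2
      have e3 : x.toNat + j = (x + (j:Int)).toNat := by omega
      have e4 : (x+L).toNat + j = (x + (j:Int) + L).toNat := by omega
      simp_all
  constructor
  · intro h
    by_contra hlt
    have hs := (scanMis_spec cs L x).2
    have hge := scanMis_ge cs L x
    set s := scanMis cs L x with hs'
    have : s = x + ((s - x).toNat : Int) := by omega
    have hj : (s - x).toNat < L.toNat := by omega
    exact hs (by rw [this]; exact (hmatch _ hj).2 (h _ hj))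
  · intro h j hj
    have := (scanMis_spec cs L x).1 (x + j) (by omega) (by omega)
    exact (hmatch j hj).1 this
theorem bInner_spec (cs : List Char) (x : Int) (hx : 0 ≤ x) :
    ∀ (Ls : List Int) (d : PySem.Dict Int Int), InvD cs x d →
      (bInner cs x d Ls).1 =
        ((Ls.find? (fun L => decide (L ≤ scanMis cs L x - x))).map
            (fun L => PySem.List.slice cs (some x) (some (x + L))))
        ∧ InvD cs x (bInner cs x d Ls).2 := by
  intro Ls
  induction Ls with
  | nil => intro d hd; exact ⟨rfl, hd⟩
  | cons L rest ih =>
    intro d hd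
    rw [bInner]
    by_cases hm : d.getD L (-1) < x
    · rw [if_pos hm]
      have hd' : InvD cs x (d.insert L (scanMis cs L x)) := by
        intro L' m' hm'
        rw [PySem.Dict.get?_insert] at hm'
        split at hm'
        · rename_i heq
          subst heq
          exact ⟨x, hx, le_refl x, by injection hm' with h; exact h.symm⟩
        · exact hd L' m' hm'
      by_cases hc : L ≤ scanMis cs L x - x
      · have hf : List.find? (fun L' => decide (L' ≤ scanMis cs L' x - x)) (L :: rest) = some L :=
          List.find?_cons_of_pos (by simpa using hc)
        rw [if_pos hc, hf]
        exact ⟨rfl, hd'⟩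
      · have hf : List.find? (fun L' => decide (L' ≤ scanMis cs L' x - x)) (L :: rest) =
            List.find? (fun L' => decide (L' ≤ scanMis cs L' x - x)) rest :=
          List.find?_cons_of_neg (by simpa using hc)
        rw [if_neg hc, hf]
        exact ih _ hd'
    · rw [if_neg hm]
      push Not at hm
      have hsome : d.get? L = some (d.getD L (-1)) := by
        cases hg : d.get? L with
        | none =>
          rw [PySem.Dict.getD_eq_get?_getD, hg] at hm
          simp at hm; omega
        | some v => rw [PySem.Dict.getD_eq_get?_getD, hg]; rfl
      obtain ⟨x0, h0, h1, h2⟩ := hd L _ hsome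
      have habs : scanMis cs L x = d.getD L (-1) := by
        rw [h2] at hm ⊢; exact scanMis_absorb cs L x0 x h1 hm
      by_cases hc : L ≤ d.getD L (-1) - x
      · have hf : List.find? (fun L' => decide (L' ≤ scanMis cs L' x - x)) (L :: rest) = some L :=
          List.find?_cons_of_pos (by simpa using (show L ≤ scanMis cs L x - x by omega))
        rw [if_pos hc, hf]
        exact ⟨rfl, hd⟩
      · have hf : List.find? (fun L' => decide (L' ≤ scanMis cs L' x - x)) (L :: rest) =
            List.find? (fun L' => decide (L' ≤ scanMis cs L' x - x)) rest :=
          List.find?_cons_of_neg (by simpa using (show ¬ L ≤ scanMis cs L x - x by omega))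
        rw [if_neg hc, hf]
        exact ih _ hd

theorem aInner_eq (cs : List Char) (x : Int) :
    ∀ (K : Nat) (a : Int), aInner cs x (a - x - 1) (PySem.List.pyRange a (a + K) 1) =
      ((PySem.List.pyRange a (a + K) 1).find?
          (fun i => decide (PySem.List.slice cs (some x) (some i) =
            PySem.List.slice cs (some i) (some (2 * i - x))))).map
        (fun i => PySem.List.slice cs (some x) (some i)) := by
  intro K
  induction K with
  | zero =>
    intro a
    rw [show a + ((0:Nat):Int) = a by simp, PySem.List.pyRange_one_eq_nil (le_refl a)]
    rfl
  | succ K ih =>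
    intro a
    rw [PySem.List.pyRange_one_cons (by push_cast; omega)]
    rw [aInner]
    rw [show a + (a - x - 1 + 1) = 2 * a - x by ring]
    by_cases hc : PySem.List.slice cs (some x) (some a) = PySem.List.slice cs (some a) (some (2 * a - x))
    · have hf : List.find? (fun i => decide (PySem.List.slice cs (some x) (some i) =
            PySem.List.slice cs (some i) (some (2 * i - x))))
            (a :: PySem.List.pyRange (a + 1) (a + ((K:Nat) + 1 : Nat)) 1) = some a :=
        List.find?_cons_of_pos (by simpa using hc)
      rw [if_pos hc, hf]
      rfl
    · have hf : List.find? (fun i => decide (PySem.List.slice cs (some x) (some i) =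
            PySem.List.slice cs (some i) (some (2 * i - x))))
            (a :: PySem.List.pyRange (a + 1) (a + ((K:Nat) + 1 : Nat)) 1) =
          List.find? (fun i => decide (PySem.List.slice cs (some x) (some i) =
            PySem.List.slice cs (some i) (some (2 * i - x))))
            (PySem.List.pyRange (a + 1) (a + ((K:Nat) + 1 : Nat)) 1) :=
        List.find?_cons_of_neg (by simpa using hc)
      rw [if_neg hc, hf]
      rw [show a - x - 1 + 1 = (a + 1) - x - 1 by ring,
          show a + ((K:Nat) + 1 : Nat) = (a + 1) + (K:Nat) by push_cast; ring]
      exact ih (a + 1)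

theorem find?_congr_mem {α : Type} (l : List α) (p q : α → Bool)
    (h : ∀ a ∈ l, p a = q a) : l.find? p = l.find? q := by
  induction l with
  | nil => rfl
  | cons a t ih =>
    have ha := h a (by simp)
    by_cases hp : p a = true
    · rw [List.find?_cons_of_pos hp, List.find?_cons_of_pos (ha ▸ hp)]
    · rw [List.find?_cons_of_neg hp, List.find?_cons_of_neg (fun hq => hp (ha ▸ hq))]
      exact ih (fun a ha' => h a (by simp [ha']))

theorem pyRange_one_congr (a b b' : Int) (h : (b - a).toNat = (b' - a).toNat) :
    PySem.List.pyRange a b 1 = PySem.List.pyRange a b' 1 := by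
  rw [PySem.List.pyRange_one, PySem.List.pyRange_one, h]

theorem inner_x (cs : List Char) (x : Int) (hx : 0 ≤ x) (d : PySem.Dict Int Int)
    (hd : InvD cs x d) :
    aInner cs x 0 (PySem.List.pyRange (x + 1) (PySem.Int.floordiv ((cs.length : Int) + x) 2 + 1) 1) =
      (bInner cs x d (PySem.List.pyRange 1 (PySem.Int.floordiv ((cs.length : Int) - x) 2 + 1) 1)).1 ∧
    InvD cs x (bInner cs x d (PySem.List.pyRange 1 (PySem.Int.floordiv ((cs.length : Int) - x) 2 + 1) 1)).2 := by
  have hf1 : PySem.Int.floordiv ((cs.length : Int) + x) 2 = ((cs.length : Int) + x) / 2 :=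
    PySem.Int.floordiv_eq_ediv_of_pos (by norm_num)
  have hf2 : PySem.Int.floordiv ((cs.length : Int) - x) 2 = ((cs.length : Int) - x) / 2 :=
    PySem.Int.floordiv_eq_ediv_of_pos (by norm_num)
  have hA : PySem.List.pyRange (x + 1) (PySem.Int.floordiv ((cs.length : Int) + x) 2 + 1) 1 =
      PySem.List.pyRange (x + 1) ((x + 1) + ((((cs.length : Int) - x) / 2).toNat : Int)) 1 := by
    apply pyRange_one_congr
    rw [hf1]
    omega
  have hB : PySem.List.pyRange 1 (PySem.Int.floordiv ((cs.length : Int) - x) 2 + 1) 1 =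
      PySem.List.pyRange 1 (1 + ((((cs.length : Int) - x) / 2).toNat : Int)) 1 := by
    apply pyRange_one_congr
    rw [hf2]
    omega
  rw [hA, hB]
  have hbs := bInner_spec cs x hx
    (PySem.List.pyRange 1 (1 + ((((cs.length : Int) - x) / 2).toNat : Int)) 1) d hd
  refine ⟨?_, hbs.2⟩
  rw [hbs.1]
  rw [show (0 : Int) = (x + 1) - x - 1 by ring]
  rw [aInner_eq cs x ((((cs.length : Int) - x) / 2).toNat) (x + 1)]
  have hrA : PySem.List.pyRange (x + 1) ((x + 1) + ((((cs.length : Int) - x) / 2).toNat : Int)) 1 =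
      (List.range ((((cs.length : Int) - x) / 2).toNat)).map (fun k : Nat => (x + 1) + (k : Int)) := by
    rw [PySem.List.pyRange_one]
    have : ((x + 1) + ((((cs.length : Int) - x) / 2).toNat : Int) - (x + 1)).toNat
        = (((cs.length : Int) - x) / 2).toNat := by omega
    rw [this]
  have hrB : PySem.List.pyRange 1 (1 + ((((cs.length : Int) - x) / 2).toNat : Int)) 1 =
      (List.range ((((cs.length : Int) - x) / 2).toNat)).map (fun k : Nat => 1 + (k : Int)) := by
    rw [PySem.List.pyRange_one]
    have : ((1 : Int) + ((((cs.length : Int) - x) / 2).toNat : Int) - 1).toNat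
        = (((cs.length : Int) - x) / 2).toNat := by omega
    rw [this]
  rw [hrA, hrB, List.find?_map, List.find?_map]
  have hpt : List.find? ((fun i => decide (PySem.List.slice cs (some x) (some i) =
        PySem.List.slice cs (some i) (some (2 * i - x)))) ∘ (fun k : Nat => (x + 1) + (k : Int)))
        (List.range ((((cs.length : Int) - x) / 2).toNat)) =
      List.find? ((fun L => decide (L ≤ scanMis cs L x - x)) ∘ (fun k : Nat => 1 + (k : Int)))
        (List.range ((((cs.length : Int) - x) / 2).toNat)) := by
    apply find?_congr_mem
    intro k hk
    rw [List.mem_range] at hk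
    have hcond := cond_iff cs x (1 + (k : Int)) hx (by omega) (by omega)
    simp only [Function.comp_apply]
    rw [show x + (1 + (k : Int)) = x + 1 + (k : Int) by ring,
        show x + 2 * (1 + (k : Int)) = 2 * (x + 1 + (k : Int)) - x by ring] at hcond
    exact decide_eq_decide.mpr hcond
  rw [hpt]
  cases hfind : List.find? ((fun L => decide (L ≤ scanMis cs L x - x)) ∘ (fun k : Nat => 1 + (k : Int)))
      (List.range ((((cs.length : Int) - x) / 2).toNat)) with
  | none => rfl
  | some k =>
    simp only [Option.map_some]
    rw [show x + 1 + (k : Int) = x + (1 + (k : Int)) by ring]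

theorem outer_eq (cs : List Char) :
    ∀ (K : Nat) (a : Int) (d : PySem.Dict Int Int), 0 ≤ a → InvD cs a d →
      aOuter cs (cs.length : Int) (PySem.List.pyRange a (a + K) 1) =
        bOuter cs (cs.length : Int) d (PySem.List.pyRange a (a + K) 1) := by
  intro K
  induction K with
  | zero =>
    intro a d ha hd
    rw [show a + ((0 : Nat) : Int) = a by simp, PySem.List.pyRange_one_eq_nil (le_refl a)]
    rfl
  | succ K ih =>
    intro a d ha hd
    rw [PySem.List.pyRange_one_cons (by push_cast; omega)]
    obtain ⟨h1, h2⟩ := inner_x cs a ha d hd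
    rw [aOuter, bOuter]
    rcases hbi : bInner cs a d (PySem.List.pyRange 1
        (PySem.Int.floordiv ((cs.length : Int) - a) 2 + 1) 1) with ⟨r, d'⟩
    rw [hbi] at h1 h2
    rw [h1]
    cases r with
    | some p => rfl
    | none =>
      simp only
      rw [show a + (((K : Nat) + 1 : Nat) : Int) = (a + 1) + (K : Int) by push_cast; ring]
      exact ih (a + 1) d' (by omega) (InvD_mono cs a (a + 1) (by omega) d' h2)

theorem empty_inv (cs : List Char) : InvD cs 0 PySem.Dict.empty := by
  intro L m hm
  simp [PySem.Dict.get?_empty] at hm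

-- ===== VERDICT (by name: the statement is the Claim_ definition above) =====
theorem algorytm_spec : Claim_equal_algorytm := by
  intro ciag _
  unfold Spec_algorytm algorytm algorytm_alt
  simp only [PySem.Str.len_eq]
  have key : aOuter ciag.toList (ciag.toList.length : Int)
        (PySem.List.pyRange 0 (ciag.toList.length : Int) 1) =
      bOuter ciag.toList (ciag.toList.length : Int) PySem.Dict.empty
        (PySem.List.pyRange 0 (ciag.toList.length : Int) 1) := by
    have hr : PySem.List.pyRange 0 ((ciag.toList.length : Nat) : Int) 1 =
        PySem.List.pyRange 0 ((0 : Int) + ((ciag.toList.length : Nat) : Int)) 1 := by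
      apply pyRange_one_congr
      omega
    rw [hr]
    exact outer_eq ciag.toList ciag.toList.length 0 PySem.Dict.empty (le_refl 0)
      (empty_inv ciag.toList)
  rw [key]
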